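-- pv_equiv track=rewrite | github.com/SandroCJ210/CC0E5-Personal | Examenes/PE/P1.py | get_max_helper
-- ===== SOURCE A (Python) =====
-- def get_max_helper(maxSatisfied, beverage, remainingPreferences):
--     #Base case
--     if(len(remainingPreferences) == 0):
--         return maxSatisfied
--
--     #Auxiliar variable to get the new beverage
--     auxBeverage = beverage[:]
--     a, b, c = remainingPreferences[0]
--
--     #Condition: fraction of beverage must be greater than
--     #their A, B or C, else they wont like it.
--     auxBeverage[0] = max(beverage[0], a)
--     auxBeverage[1] = max(beverage[1], b)
--     auxBeverage[2] = max(beverage[2], c)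
--
--     #Simple pruning based on the problem conditions
--     if(auxBeverage[0] + auxBeverage[1] + auxBeverage[2] > 10000):
--         return maxSatisfied
--
--     del remainingPreferences[0]
--
--     #Recursion with backtracking
--     return max(get_max_helper(maxSatisfied + 1, auxBeverage, remainingPreferences[:]),
--                get_max_helper(maxSatisfied, beverage, remainingPreferences[:]))
-- ===== SOURCE B (Python) =====
-- def get_max_helper(maxSatisfied, beverage, remainingPreferences):
--     # Frontier DP: process preferences level by level, keeping for each reachable
--     # beverage state (component-wise max triple) the best count so far; dead
--     # branches (threshold sum > 10000) are harvested into `best`.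
--     if len(remainingPreferences) == 0:
--         return maxSatisfied
--     frontier = {(beverage[0], beverage[1], beverage[2]): maxSatisfied}
--     best = maxSatisfied
--     for (a, b, c) in remainingPreferences:
--         new = {}
--         for (x, y, z), cnt in frontier.items():
--             j = (max(x, a), max(y, b), max(z, c))
--             if j[0] + j[1] + j[2] > 10000:
--                 best = max(best, cnt)
--             else:
--                 _put(new, j, cnt + 1)
--                 _put(new, (x, y, z), cnt)
--         frontier = new
--     for cnt in frontier.values():
--         best = max(best, cnt)
--     return best
--
--
-- def _put(d, k, v):
--     if k in d:
--         d[k] = max(d[k], v)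
--     else:
--         d[k] = v
-- ===== Notes on version B (the rewrite author's own statement) =====
-- stated objective: faster
-- what changed: Replaces A's exponential include/skip backtracking recursion with an iterative level-by-level frontier DP that keeps, per reachable beverage-state triple, only the best count (dict keyed by state), harvesting pruned branches into a running max.
import Mathlib
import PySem

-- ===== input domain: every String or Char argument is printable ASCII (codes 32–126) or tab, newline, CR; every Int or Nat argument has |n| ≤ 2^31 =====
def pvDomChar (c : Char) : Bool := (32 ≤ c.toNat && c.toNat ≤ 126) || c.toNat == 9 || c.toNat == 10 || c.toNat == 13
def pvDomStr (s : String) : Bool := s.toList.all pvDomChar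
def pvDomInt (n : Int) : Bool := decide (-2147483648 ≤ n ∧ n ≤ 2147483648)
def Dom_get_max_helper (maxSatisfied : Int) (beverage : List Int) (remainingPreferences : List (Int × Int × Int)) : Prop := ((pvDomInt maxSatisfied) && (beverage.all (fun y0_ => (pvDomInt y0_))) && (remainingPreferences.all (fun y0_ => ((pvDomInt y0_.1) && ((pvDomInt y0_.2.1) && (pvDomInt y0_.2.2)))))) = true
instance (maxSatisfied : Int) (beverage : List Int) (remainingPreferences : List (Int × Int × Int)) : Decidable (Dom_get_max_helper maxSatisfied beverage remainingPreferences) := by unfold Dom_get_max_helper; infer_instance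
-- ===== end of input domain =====

-- B replaces A's exponential include/skip recursion by a level-by-level frontier DP over
-- deduplicated beverage states (objective: faster). Python A also deletes the first element
-- of the caller's remainingPreferences list; equivalence here is about the return value only.

-- ===== PORT A =====
-- literal port of A's recursion; inside Pre_ (beverage has ≥ 3 entries when any preference
-- remains) the getD defaults are never the value actually used by the Python.
def get_max_helper (maxSatisfied : Int) (beverage : List Int) (remainingPreferences : List (Int × Int × Int)) : Int :=
  match remainingPreferences with
  | [] => maxSatisfied
  | (a, b, c) :: rest =>
    let aux : List Int :=
      [max (beverage.getD 0 0) a, max (beverage.getD 1 0) b, max (beverage.getD 2 0) c]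
        ++ beverage.drop 3
    if aux.getD 0 0 + aux.getD 1 0 + aux.getD 2 0 > 10000 then maxSatisfied
    else max (get_max_helper (maxSatisfied + 1) aux rest)
             (get_max_helper maxSatisfied beverage rest)

-- ===== PORT B =====
-- B-side helpers (transliterations of Source B): the frontier dict is the association list of
-- (state triple, best count); _put updates in place keeping the max.
def putMax (d : List ((Int × Int × Int) × Int)) (k : Int × Int × Int) (v : Int) : List ((Int × Int × Int) × Int) :=
  match d with
  | [] => [(k, v)]
  | (k', v') :: t => if k' = k then (k', max v' v) :: t else (k', v') :: putMax t k v

def stepPref (a b c : Int) (acc : Int × List ((Int × Int × Int) × Int)) (e : (Int × Int × Int) × Int) :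
    Int × List ((Int × Int × Int) × Int) :=
  let j : Int × Int × Int := (max e.1.1 a, max e.1.2.1 b, max e.1.2.2 c)
  if j.1 + j.2.1 + j.2.2 > 10000 then (max acc.1 e.2, acc.2)
  else (acc.1, putMax (putMax acc.2 j (e.2 + 1)) e.1 e.2)

def get_max_helper_alt (maxSatisfied : Int) (beverage : List Int) (remainingPreferences : List (Int × Int × Int)) : Int :=
  match remainingPreferences with
  | [] => maxSatisfied
  | _ =>
    let s0 : Int × Int × Int := (beverage.getD 0 0, beverage.getD 1 0, beverage.getD 2 0)
    let fin := remainingPreferences.foldl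
      (fun acc p => acc.2.foldl (stepPref p.1 p.2.1 p.2.2) (acc.1, []))
      (maxSatisfied, [(s0, maxSatisfied)])
    fin.2.foldl (fun best e => max best e.2) fin.1

-- ===== PRECONDITION & SPEC =====
-- Pre_ excludes exactly the inputs where Python A raises IndexError: a nonempty preference
-- list with a beverage of fewer than 3 entries (B raises there too).
def Pre_get_max_helper (maxSatisfied : Int) (beverage : List Int) (remainingPreferences : List (Int × Int × Int)) : Prop :=
  remainingPreferences = [] ∨ 3 ≤ beverage.length
instance (maxSatisfied : Int) (beverage : List Int) (remainingPreferences : List (Int × Int × Int)) : Decidable (Pre_get_max_helper maxSatisfied beverage remainingPreferences) := by unfold Pre_get_max_helper; infer_instance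
def pvWitness_get_max_helper : Int × List Int × (List (Int × Int × Int)) := (0, [0, 0, 0], [(1, 2, 3)])

def Spec_get_max_helper (maxSatisfied : Int) (beverage : List Int) (remainingPreferences : List (Int × Int × Int)) (out : Int) : Prop := out = get_max_helper_alt maxSatisfied beverage remainingPreferences
instance (maxSatisfied : Int) (beverage : List Int) (remainingPreferences : List (Int × Int × Int)) (out : Int) : Decidable (Spec_get_max_helper maxSatisfied beverage remainingPreferences out) := by unfold Spec_get_max_helper; infer_instance

-- ===== CLAIM (what is proved, stated in full; the proofs are below) =====
def Claim_equal_get_max_helper : Prop := ∀ (maxSatisfied : Int) (beverage : List Int) (remainingPreferences : List (Int × Int × Int)), Dom_get_max_helper maxSatisfied beverage remainingPreferences → Pre_get_max_helper maxSatisfied beverage remainingPreferences → Spec_get_max_helper maxSatisfied beverage remainingPreferences (get_max_helper maxSatisfied beverage remainingPreferences)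

-- ===== LEMMAS AND PROOFS =====

-- Abstract value of one branch: the recursion of A restated on state triples only.
def spreadF (m : Int) (s : Int × Int × Int) : List (Int × Int × Int) → Int
  | [] => m
  | (a, b, c) :: r =>
    let j : Int × Int × Int := (max s.1 a, max s.2.1 b, max s.2.2 c)
    if j.1 + j.2.1 + j.2.2 > 10000 then m
    else max (spreadF (m + 1) j r) (spreadF m s r)

theorem spreadF_shift (r : List (Int × Int × Int)) (m : Int) (s : Int × Int × Int) :
    spreadF m s r = m + spreadF 0 s r := by
  induction r generalizing m s with
  | nil => simp [spreadF]
  | cons p r ih =>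
    obtain ⟨a, b, c⟩ := p
    simp only [spreadF]
    split
    · omega
    · rw [ih (m + 1), ih m, ih (0 + 1)]
      omega

theorem spreadF_ge (r : List (Int × Int × Int)) (m : Int) (s : Int × Int × Int) :
    m ≤ spreadF m s r := by
  induction r generalizing m s with
  | nil => simp [spreadF]
  | cons p r ih =>
    obtain ⟨a, b, c⟩ := p
    simp only [spreadF]
    split
    · omega
    · exact le_trans (ih m s) (le_max_right _ _)

theorem getA_eq_spreadF (r : List (Int × Int × Int)) (m : Int) (bev : List Int) :
    get_max_helper m bev r = spreadF m (bev.getD 0 0, bev.getD 1 0, bev.getD 2 0) r := by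
  induction r generalizing m bev with
  | nil => rfl
  | cons p r ih =>
    obtain ⟨a, b, c⟩ := p
    simp only [get_max_helper, spreadF, ih]
    rfl

-- the "finish" accumulator: best so far ⊔ branch values of all frontier entries
def finish (r : List (Int × Int × Int)) (b : Int) (L : List ((Int × Int × Int) × Int)) : Int :=
  L.foldl (fun acc e => max acc (spreadF e.2 e.1 r)) b

theorem finish_max_init (r : List (Int × Int × Int)) (L : List ((Int × Int × Int) × Int)) (b x : Int) :
    finish r (max b x) L = max (finish r b L) x := by
  induction L generalizing b with
  | nil => rfl
  | cons e L ih =>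
    simp only [finish, List.foldl_cons] at *
    rw [max_right_comm b x (spreadF e.2 e.1 r), ih]

theorem finish_putMax (r : List (Int × Int × Int)) (d : List ((Int × Int × Int) × Int))
    (k : Int × Int × Int) (v b : Int) :
    finish r b (putMax d k v) = max (finish r b d) (spreadF v k r) := by
  induction d generalizing b with
  | nil =>
    simp only [putMax, finish, List.foldl_cons, List.foldl_nil]
  | cons e d ih =>
    obtain ⟨k', v'⟩ := e
    by_cases h : k' = k
    · subst h
      have hm : spreadF (max v' v) k' r = max (spreadF v' k' r) (spreadF v k' r) := by
        rw [spreadF_shift r (max v' v), spreadF_shift r v', spreadF_shift r v]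
        omega
      simp only [putMax, finish, List.foldl_cons, if_true]
      rw [hm, ← max_assoc]
      exact finish_max_init r d _ _
    · simp only [putMax, if_neg h, finish, List.foldl_cons] at *
      exact ih _

theorem inner_fold (p : Int × Int × Int) (r : List (Int × Int × Int))
    (L : List ((Int × Int × Int) × Int)) (acc : Int × List ((Int × Int × Int) × Int)) :
    finish r (L.foldl (stepPref p.1 p.2.1 p.2.2) acc).1 (L.foldl (stepPref p.1 p.2.1 p.2.2) acc).2
      = finish (p :: r) (finish r acc.1 acc.2) L := by
  induction L generalizing acc with
  | nil => rfl
  | cons e L ih =>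
    obtain ⟨s, cnt⟩ := e
    simp only [List.foldl_cons]
    rw [ih]
    have key : finish r (stepPref p.1 p.2.1 p.2.2 acc (s, cnt)).1
        (stepPref p.1 p.2.1 p.2.2 acc (s, cnt)).2
        = max (finish r acc.1 acc.2) (spreadF cnt s (p :: r)) := by
      obtain ⟨a, b, c⟩ := p
      simp only [stepPref, spreadF]
      split
      · simp only
        rw [finish_max_init r acc.2 acc.1 cnt]
      · simp only
        rw [finish_putMax, finish_putMax]
        rw [max_assoc]
    rw [key]
    rfl

theorem values_fold (L : List ((Int × Int × Int) × Int)) (b : Int) :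
    L.foldl (fun best e => max best e.2) b = finish [] b L := by
  induction L generalizing b with
  | nil => rfl
  | cons e L ih =>
    simp only [finish, List.foldl_cons, spreadF] at *

theorem outer_fold (r : List (Int × Int × Int)) (acc : Int × List ((Int × Int × Int) × Int)) :
    (r.foldl (fun acc p => acc.2.foldl (stepPref p.1 p.2.1 p.2.2) (acc.1, [])) acc).2.foldl
        (fun best e => max best e.2)
        (r.foldl (fun acc p => acc.2.foldl (stepPref p.1 p.2.1 p.2.2) (acc.1, [])) acc).1
      = finish r acc.1 acc.2 := by
  induction r generalizing acc with
  | nil =>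
    simp only [List.foldl_nil]
    exact values_fold acc.2 acc.1
  | cons p r ih =>
    simp only [List.foldl_cons]
    rw [ih]
    have := inner_fold p r acc.2 (acc.1, [])
    rw [this]
    rfl

-- ===== VERDICT (by name: the statement is the Claim_ definition above) =====
theorem get_max_helper_spec : Claim_equal_get_max_helper := by
  intro m bev prefs _ _
  unfold Spec_get_max_helper
  cases prefs with
  | nil => rfl
  | cons p r =>
    rw [getA_eq_spreadF]
    show spreadF m (bev.getD 0 0, bev.getD 1 0, bev.getD 2 0) (p :: r)
      = ((p :: r).foldl (fun acc q => acc.2.foldl (stepPref q.1 q.2.1 q.2.2) (acc.1, []))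
          (m, [((bev.getD 0 0, bev.getD 1 0, bev.getD 2 0), m)])).2.foldl
          (fun best e => max best e.2)
          ((p :: r).foldl (fun acc q => acc.2.foldl (stepPref q.1 q.2.1 q.2.2) (acc.1, []))
            (m, [((bev.getD 0 0, bev.getD 1 0, bev.getD 2 0), m)])).1
    rw [outer_fold]
    simp only [finish, List.foldl_cons, List.foldl_nil]
    have := spreadF_ge (p :: r) m (bev.getD 0 0, bev.getD 1 0, bev.getD 2 0)
    omega
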